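-- pv_equiv track=rewrite | github.com/TaiwanJeffWang/leetcode | main.py | solution
-- ===== SOURCE A (Python) =====
-- import collections
--
-- def solution(a):
--     dic = collections.defaultdict(int)
--     result = []
--     max = 0
--     for item in a:
--         num = str(item)
--         for n in num:
--             dic[n] +=1
--             if dic[n] > max:
--                 result = []
--                 max = dic[n]
--             if dic[n] == max:
--                 result.append(n)
--     result.sort()
--     return result
-- ===== SOURCE B (Python) =====
-- import collections
--
-- def solution(a):
--     cnt = collections.Counter(c for item in a for c in str(item))
--     if not cnt:
--         return []
--     m = max(cnt.values())
--     return sorted(ch for ch, v in cnt.items() if v == m)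
-- ===== Notes on version B (the rewrite author's own statement) =====
-- stated objective: simpler
-- what changed: Replaces A's interleaved running-max-with-reset loop (mutating result and max per character) by a clean decomposition: build a full Counter, take the max frequency, then filter-and-sort the characters attaining it.
import Mathlib
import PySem

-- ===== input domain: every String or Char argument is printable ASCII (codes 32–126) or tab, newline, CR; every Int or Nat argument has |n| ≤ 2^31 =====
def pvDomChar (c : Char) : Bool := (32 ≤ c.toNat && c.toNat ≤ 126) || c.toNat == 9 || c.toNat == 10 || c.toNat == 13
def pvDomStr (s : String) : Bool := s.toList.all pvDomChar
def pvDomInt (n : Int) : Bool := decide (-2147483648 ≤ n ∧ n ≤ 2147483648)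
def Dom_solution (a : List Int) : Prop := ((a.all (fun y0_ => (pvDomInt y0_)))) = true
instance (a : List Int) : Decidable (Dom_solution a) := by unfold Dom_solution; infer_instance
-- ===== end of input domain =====

-- B replaces A's interleaved running-max-with-reset loop by a count-then-max-then-filter decomposition (simpler).


-- ===== PORT A =====
-- inner loop body: dic[n] += 1; if dic[n] > max: result = []; max = dic[n]; if dic[n] == max: result.append(n)
def pvStepA (st : PySem.Dict String Int × List String × Int) (n : String) :
    PySem.Dict String Int × List String × Int :=
  let dic := (st.1).modify n 0 (· + 1)
  let cnt := dic.getD n 0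
  let result := if cnt > st.2.2 then ([] : List String) else st.2.1
  let mx := if cnt > st.2.2 then cnt else st.2.2
  let result := if cnt == mx then result ++ [n] else result
  (dic, result, mx)

def solution (a : List Int) : List String :=
  let st := a.foldl (fun st item =>
      ((PySem.Int.toStr item).toList.map (fun c => String.ofList [c])).foldl pvStepA st)
    (PySem.Dict.empty, ([] : List String), (0 : Int))
  PySem.List.sorted st.2.1 (fun x => x) false   -- result.sort(); return result

-- ===== PORT B =====
def solution_alt (a : List Int) : List String :=
  let cnt : PySem.Dict String Int :=
    PySem.Dict.counter (a.flatMap (fun item => (PySem.Int.toStr item).toList.map (fun c => String.ofList [c])))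
  -- if not cnt: return []  (cnt is empty iff cnt.values is empty, so the guard is the `none` branch of max)
  match PySem.List.max? cnt.values (fun y => y) with
  | none => []
  | some m => PySem.List.sorted ((cnt.items.filter (fun p => p.2 == m)).map (fun p => p.1)) (fun x => x) false

-- ===== PRECONDITION & SPEC =====
def Spec_solution (a : List Int) (out : List String) : Prop := out = solution_alt a
instance (a : List Int) (out : List String) : Decidable (Spec_solution a out) := by unfold Spec_solution; infer_instance

-- ===== CLAIM (what is proved, stated in full; the proofs are below) =====
def Claim_equal_solution : Prop := ∀ (a : List Int), Dom_solution a → Spec_solution a (solution a)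

-- ===== LEMMAS AND PROOFS =====

-- the char stream A and B both traverse
def pvChars (a : List Int) : List String :=
  a.flatMap (fun item => (PySem.Int.toStr item).toList.map (fun c => String.ofList [c]))

-- loop invariant for A's fold over the character stream s
def pvInv (s : List String) (st : PySem.Dict String Int × List String × Int) : Prop :=
  (∀ c, st.1.getD c 0 = (s.count c : Int)) ∧
  (∀ c ∈ s, (s.count c : Int) ≤ st.2.2) ∧
  (s = [] → st.2.2 = 0) ∧
  (s ≠ [] → ∃ c ∈ s, (s.count c : Int) = st.2.2) ∧
  st.2.1.Nodup ∧
  (∀ c, c ∈ st.2.1 ↔ c ∈ s ∧ (s.count c : Int) = st.2.2)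

lemma pvInv_init : pvInv [] (PySem.Dict.empty, ([] : List String), (0 : Int)) := by
  refine ⟨?_, by simp, by simp, by simp, by simp, by simp⟩
  intro c; simp [PySem.Dict.getD_empty]

lemma pvInv_step (s : List String) (st : PySem.Dict String Int × List String × Int)
    (x : String) (h : pvInv s st) : pvInv (s ++ [x]) (pvStepA st x) := by
  obtain ⟨dic, res, mx⟩ := st
  obtain ⟨h1, h2, h3, h4, h5, h6⟩ := h
  simp only at h1 h2 h3 h4 h5 h6
  have hcnt : ∀ c : String, (s ++ [x]).count c = s.count c + (if c = x then 1 else 0) := by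
    intro c
    rw [List.count_append]
    by_cases hcx : c = x
    · simp [hcx]
    · simp [hcx, List.count_eq_zero.mpr (by simp [hcx] : c ∉ [x])]
  have hcx : (dic.modify x 0 (· + 1)).getD x 0 = (s.count x : Int) + 1 := by
    rw [PySem.Dict.getD_modify_self, h1]
  have hgetD : ∀ c : String, (dic.modify x 0 (· + 1)).getD c 0 = ((s ++ [x]).count c : Int) := by
    intro c
    rw [hcnt c, PySem.Dict.getD_modify]
    by_cases hc : c = x
    · rw [if_pos hc, if_pos hc, h1, hc]; push_cast; omega
    · rw [if_neg hc, if_neg hc, h1]; push_cast; omega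
  by_cases hgt : ((s.count x : Int) + 1) > mx
  · -- new maximum: result is reset to [] and x appended
    have hstep : pvStepA (dic, res, mx) x
        = (dic.modify x 0 (· + 1), [x], (s.count x : Int) + 1) := by
      simp [pvStepA, hcx, hgt]
    rw [hstep]
    refine ⟨hgetD, ?_, by simp, ?_, by simp, ?_⟩
    · intro c hcmem
      rw [hcnt c]
      by_cases hc : c = x
      · simp [hc]
      · simp only [hc, if_false]
        have hcs : c ∈ s := by
          rcases List.mem_append.mp hcmem with h | h
          · exact h
          · simp at h; exact absurd h hc
        have := h2 c hcs
        push_cast; omega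
    · intro _
      exact ⟨x, by simp, by rw [hcnt x]; simp⟩
    · intro c
      constructor
      · intro hc; simp at hc; subst hc
        exact ⟨by simp, by rw [hcnt c]; simp⟩
      · rintro ⟨hcmem, hccount⟩
        rw [hcnt c] at hccount
        by_cases hc : c = x
        · simp [hc]
        · exfalso
          simp only [hc, if_false] at hccount
          have hcs : c ∈ s := by
            rcases List.mem_append.mp hcmem with h | h
            · exact h
            · simp at h; exact absurd h hc
          have := h2 c hcs
          push_cast at hccount
          omega
  · -- count x did not exceed the running max
    rw [not_lt] at hgt
    by_cases heq : ((s.count x : Int) + 1) = mx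
    · -- x reaches the current max: appended
      have hstep : pvStepA (dic, res, mx) x
          = (dic.modify x 0 (· + 1), res ++ [x], mx) := by
        simp [pvStepA, hcx, heq]
      rw [hstep]
      have hxnotin : x ∉ res := by
        intro hx
        have := (h6 x).mp hx
        omega
      refine ⟨hgetD, ?_, by simp, ?_, ?_, ?_⟩
      · intro c hcmem
        rw [hcnt c]
        by_cases hc : c = x
        · simp [hc]; omega
        · simp only [hc, if_false]
          have hcs : c ∈ s := by
            rcases List.mem_append.mp hcmem with h | h
            · exact h
            · simp at h; exact absurd h hc
          have := h2 c hcs; push_cast; omega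
      · intro _
        exact ⟨x, by simp, by rw [hcnt x]; simp; omega⟩
      · exact List.Nodup.append h5 (by simp) (by simp [hxnotin])
      · intro c
        rw [List.mem_append]
        by_cases hc : c = x
        · subst hc
          simp only [hxnotin, List.mem_singleton]
          constructor
          · intro _; exact ⟨by simp, by rw [hcnt c]; simp; omega⟩
          · intro _; simp
        · simp only [List.mem_singleton, hc, or_false]
          rw [h6 c, hcnt c]
          simp only [hc, if_false]
          constructor
          · rintro ⟨hcs, hcc⟩; exact ⟨List.mem_append.mpr (Or.inl hcs), by push_cast; omega⟩
          · rintro ⟨hcmem, hcc⟩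
            have hcs : c ∈ s := by
              rcases List.mem_append.mp hcmem with h | h
              · exact h
              · simp at h; exact absurd h hc
            exact ⟨hcs, by push_cast at hcc ⊢; omega⟩
    · -- strictly below the max: nothing appended
      have hlt : ((s.count x : Int) + 1) < mx := lt_of_le_of_ne hgt heq
      have hstep : pvStepA (dic, res, mx) x
          = (dic.modify x 0 (· + 1), res, mx) := by
        simp [pvStepA, hcx, not_lt.mpr hgt]
        intro hcon; omega
      rw [hstep]
      have hsne : s ≠ [] := by
        intro hnil
        have := h3 hnil
        subst hnil
        simp at hlt
        omega
      refine ⟨hgetD, ?_, by simp, ?_, h5, ?_⟩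
      · intro c hcmem
        rw [hcnt c]
        by_cases hc : c = x
        · simp [hc]; omega
        · simp only [hc, if_false]
          have hcs : c ∈ s := by
            rcases List.mem_append.mp hcmem with h | h
            · exact h
            · simp at h; exact absurd h hc
          have := h2 c hcs; push_cast; omega
      · intro _
        obtain ⟨c, hcs, hcc⟩ := h4 hsne
        have hcx2 : c ≠ x := by
          intro hce; subst hce; omega
        exact ⟨c, List.mem_append.mpr (Or.inl hcs), by rw [hcnt c]; simp [hcx2]; omega⟩
      · intro c
        rw [h6 c, hcnt c]
        by_cases hc : c = x
        · subst hc
          constructor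
          · rintro ⟨_, hcc⟩; omega
          · rintro ⟨_, hcc⟩; simp at hcc; omega
        · simp only [hc, if_false]
          constructor
          · rintro ⟨hcs, hcc⟩; exact ⟨List.mem_append.mpr (Or.inl hcs), by push_cast; omega⟩
          · rintro ⟨hcmem, hcc⟩
            have hcs : c ∈ s := by
              rcases List.mem_append.mp hcmem with h | h
              · exact h
              · simp at h; exact absurd h hc
            exact ⟨hcs, by push_cast at hcc ⊢; omega⟩

lemma pvInv_foldl (s : List String) :
    pvInv s (s.foldl pvStepA (PySem.Dict.empty, ([] : List String), (0 : Int))) := by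
  induction s using List.reverseRecOn with
  | nil => exact pvInv_init
  | append_singleton s x ih =>
      rw [List.foldl_append]
      exact pvInv_step s _ x ih

lemma pvFoldl_flatMap (l : List Int) (st : PySem.Dict String Int × List String × Int) :
    l.foldl (fun st item =>
      ((PySem.Int.toStr item).toList.map (fun c => String.ofList [c])).foldl pvStepA st) st
    = (pvChars l).foldl pvStepA st := by
  induction l generalizing st with
  | nil => simp [pvChars]
  | cons x l ih =>
      rw [List.foldl_cons, ih, pvChars, pvChars, List.flatMap_cons, List.foldl_append]

-- ===== VERDICT (by name: the statement is the Claim_ definition above) =====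
theorem solution_spec : Claim_equal_solution := by
  unfold Claim_equal_solution
  intro a _
  unfold Spec_solution solution solution_alt
  rw [pvFoldl_flatMap]
  rw [show (a.flatMap fun item => (PySem.Int.toStr item).toList.map (fun c => String.ofList [c]))
        = pvChars a from rfl]
  by_cases hsnil : pvChars a = []
  · rw [hsnil]; rfl
  · obtain ⟨h1, h2, h3, h4, h5, h6⟩ := pvInv_foldl (pvChars a)
    have hvals : (PySem.Dict.counter (pvChars a)).values
        = (PySem.Set.ofList (pvChars a)).map (fun k => ((pvChars a).count k : Int)) := by
      simp only [PySem.Dict.values, PySem.Dict.items_counter, List.map_map]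
      rfl
    obtain ⟨y, hy⟩ := List.exists_mem_of_ne_nil _ hsnil
    have hyset : y ∈ PySem.Set.ofList (pvChars a) := (PySem.Set.mem_ofList _ _).mpr hy
    have hvne : (PySem.Dict.counter (pvChars a)).values ≠ [] := by
      rw [hvals]
      intro hnil
      exact absurd (List.mem_map_of_mem hyset (f := fun k => (((pvChars a).count k : Int)))) (by rw [hnil]; simp)
    obtain ⟨m, hm⟩ : ∃ m, PySem.List.max? (PySem.Dict.counter (pvChars a)).values (fun y => y) = some m := by
      cases hmm : PySem.List.max? (PySem.Dict.counter (pvChars a)).values (fun y => y) with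
      | none => exact absurd ((PySem.List.max?_eq_none_iff _ _).mp hmm) hvne
      | some m => exact ⟨m, rfl⟩
    -- m equals A's final running max
    have hmmem := PySem.List.max?_mem hm
    rw [hvals] at hmmem
    obtain ⟨k, hk, hkm⟩ := List.mem_map.mp hmmem
    have hmle : m ≤ ((pvChars a).foldl pvStepA (PySem.Dict.empty, ([] : List String), (0 : Int))).2.2 := by
      rw [← hkm]
      exact h2 k ((PySem.Set.mem_ofList _ _).mp hk)
    have hlem : ((pvChars a).foldl pvStepA (PySem.Dict.empty, ([] : List String), (0 : Int))).2.2 ≤ m := by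
      obtain ⟨c, hcS, hcc⟩ := h4 hsnil
      have : ((pvChars a).count c : Int) ∈ (PySem.Dict.counter (pvChars a)).values := by
        rw [hvals]
        exact List.mem_map_of_mem ((PySem.Set.mem_ofList _ _).mpr hcS)
      have := PySem.List.max?_isMax hm _ this
      simpa [hcc] using this
    have hmeq : m = ((pvChars a).foldl pvStepA (PySem.Dict.empty, ([] : List String), (0 : Int))).2.2 :=
      le_antisymm hmle hlem
    -- B's filtered key list
    have hBlist : (((PySem.Dict.counter (pvChars a)).items.filter (fun p => p.2 == m)).map (fun p => p.1))
        = (PySem.Set.ofList (pvChars a)).filter (fun k => ((pvChars a).count k : Int) == m) := by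
      rw [PySem.Dict.items_counter, List.filter_map, List.map_map]
      simp [Function.comp_def]
    simp only [hm, hBlist]
    apply PySem.List.sorted_eq_sorted_of_perm
    · exact fun u v huv => huv
    · rw [List.perm_ext_iff_of_nodup h5 (List.Nodup.filter _ (PySem.Set.nodup_ofList _))]
      intro c
      rw [h6 c, List.mem_filter, PySem.Set.mem_ofList, ← hmeq]
      simp
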